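-- pv_equiv track=rewrite | github.com/lefarov/cp_playground | isomorphic/path_with_min_height.py | find_min_max_path_dp
-- ===== SOURCE A (Python) =====
-- from typing import List, Set, Tuple
--
-- def find_min_max_path_dp(grid: List[List[int]]):
--     m, n = len(grid), len(grid[0])
--     max_num_so_far = [[0 for _ in range(n)] for _ in range(m)]
--
--     for i in range(m):
--         for j in range(n):
--             if i == 0 and j == 0:
--                 max_num_so_far[i][j] = grid[i][j]
--             elif i == 0 and j > 0:
--                 max_num_so_far[i][j] = max(max_num_so_far[i][j - 1], grid[i][j])
--             elif i > 0 and j == 0: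
--                 max_num_so_far[i][j] = max(max_num_so_far[i - 1][j], grid[i][j])
--             else:
--                 max_num_so_far[i][j] = max(min(max_num_so_far[i - 1][j], max_num_so_far[i][j - 1]), grid[i][j])
--     return max_num_so_far[m-1][n-1]
-- ===== SOURCE B (Python) =====
-- def find_min_max_path_dp(grid):
--     n = len(grid[0])
--
--     def reachable(t):
--         # can[j]: is (i, j) reachable using only cells <= t
--         can = []
--         ok = True
--         for x in grid[0]:
--             ok = ok and x <= t
--             can.append(ok)
--         for row in grid[1:]:
--             new = [can[0] and row[0] <= t]
--             for j in range(1, n):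
--                 new.append((new[j - 1] or can[j]) and row[j] <= t)
--             can = new
--         return can[n - 1]
--
--     vals = sorted(set(v for row in grid for v in row))
--     lo, hi = 0, len(vals) - 1
--     while lo < hi:
--         mid = (lo + hi) // 2
--         if reachable(vals[mid]):
--             hi = mid
--         else:
--             lo = mid + 1
--     return vals[lo]
-- ===== Notes on version B (the rewrite author's own statement) =====
-- stated objective: alternative
-- what changed: A computes the min-max path value directly with a dynamic-programming table over the grid; B instead binary-searches over the sorted distinct cell values for the smallest threshold t such that the corner is reachable through cells all <= t (a boolean reachability test per probe).
import Mathlib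
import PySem

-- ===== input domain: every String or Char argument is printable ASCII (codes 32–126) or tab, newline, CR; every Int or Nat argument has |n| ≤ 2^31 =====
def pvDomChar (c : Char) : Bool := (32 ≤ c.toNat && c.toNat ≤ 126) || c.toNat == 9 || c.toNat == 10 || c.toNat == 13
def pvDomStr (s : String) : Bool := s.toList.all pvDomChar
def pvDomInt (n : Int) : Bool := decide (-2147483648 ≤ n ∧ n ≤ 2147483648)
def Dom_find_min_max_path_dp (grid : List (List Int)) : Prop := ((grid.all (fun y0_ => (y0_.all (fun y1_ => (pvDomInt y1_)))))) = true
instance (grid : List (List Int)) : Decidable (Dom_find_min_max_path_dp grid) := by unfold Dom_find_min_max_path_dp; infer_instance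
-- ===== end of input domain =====

-- B replaces A's direct DP by a different algorithm: binary search over the sorted distinct
-- cell values for the least threshold t such that the bottom-right corner is reachable
-- moving right/down through cells all ≤ t; objective: alternative algorithm, not faster.

-- ===== PORT A =====
-- table read t[i][j] (these indices are always non-negative and in range in Python; getD is exact there)
def tget (t : List (List Int)) (i j : Nat) : Int := (t.getD i []).getD j 0
-- table write t[i][j] = v
def tset (t : List (List Int)) (i j : Nat) (v : Int) : List (List Int) :=
  t.set i ((t.getD i []).set j v)

-- body of A's inner loop (the if/elif chain, branches in Python order)
def bodyA (grid : List (List Int)) (i : Nat) (t : List (List Int)) (j : Nat) : List (List Int) :=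
  if i = 0 ∧ j = 0 then tset t i j (tget grid i j)
  else if i = 0 ∧ 0 < j then tset t i j (max (tget t i (j-1)) (tget grid i j))
  else if 0 < i ∧ j = 0 then tset t i j (max (tget t (i-1) j) (tget grid i j))
  else tset t i j (max (min (tget t (i-1) j) (tget t i (j-1))) (tget grid i j))

-- A's inner loop: for j in range(n)
def rowA (grid : List (List Int)) (n : Nat) (t : List (List Int)) (i : Nat) : List (List Int) :=
  (List.range n).foldl (bodyA grid i) t

def find_min_max_path_dp (grid : List (List Int)) : Int :=
  let m := grid.length
  let n := grid.headI.length
  let tbl := (List.range m).foldl (rowA grid n) (List.replicate m (List.replicate n 0))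
  tget tbl (m-1) (n-1)

-- ===== PORT B =====
-- B's first-row loop of reachable(): ok accumulator, can.append(ok)
def canFirst (t : Int) (ok : Bool) : List Int → List Bool
  | [] => []
  | x :: xs => (ok && decide (x ≤ t)) :: canFirst t (ok && decide (x ≤ t)) xs

-- B's inner loop over j in range(1, n): new.append((new[j-1] or can[j]) and row[j] <= t)
def canNextAux (t : Int) (last : Bool) : List Bool → List Int → List Bool
  | c :: cs, r :: rs => ((last || c) && decide (r ≤ t)) :: canNextAux t ((last || c) && decide (r ≤ t)) cs rs
  | _, _ => []

-- B's new = [can[0] and row[0] <= t] followed by the inner loop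
def canNext (t : Int) (can : List Bool) (row : List Int) : List Bool :=
  match can, row with
  | c :: cs, r :: rs => (c && decide (r ≤ t)) :: canNextAux t (c && decide (r ≤ t)) cs rs
  | _, _ => []

-- B's reachable(t): fold the rolling boolean row over the remaining rows, return can[n-1]
def reachableB (grid : List (List Int)) (t : Int) : Bool :=
  ((grid.tail).foldl (canNext t) (canFirst t true grid.headI)).getD (grid.headI.length - 1) false

-- B's binary-search loop (lo, hi are non-negative Python ints; Nat is exact here,
-- and (lo+hi)//2 on non-negative ints is Nat division)
def bsLoop (grid : List (List Int)) (vals : List Int) (lo hi : Nat) : Nat :=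
  if lo < hi then
    if reachableB grid (vals.getD ((lo + hi) / 2) 0) then bsLoop grid vals lo ((lo + hi) / 2)
    else bsLoop grid vals ((lo + hi) / 2 + 1) hi
  else lo
termination_by hi - lo
decreasing_by all_goals omega

def find_min_max_path_dp_alt (grid : List (List Int)) : Int :=
  let vals := PySem.List.sorted (PySem.Set.ofList (grid.flatMap (fun r => r))) (fun x => x) false
  vals.getD (bsLoop grid vals 0 (vals.length - 1)) 0

-- ===== PRECONDITION & SPEC =====
-- Pre_ is exactly where Python A returns: a nonempty grid, a nonempty first row, and
-- every row at least as long as the first (A raises IndexError otherwise).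
def Pre_find_min_max_path_dp (grid : List (List Int)) : Prop :=
  grid ≠ [] ∧ 0 < grid.headI.length ∧ ∀ row ∈ grid, grid.headI.length ≤ row.length
instance (grid : List (List Int)) : Decidable (Pre_find_min_max_path_dp grid) := by
  unfold Pre_find_min_max_path_dp; infer_instance

def pvWitness_find_min_max_path_dp : List (List Int) := [[1, 2], [3, 4]]

def Spec_find_min_max_path_dp (grid : List (List Int)) (out : Int) : Prop := out = find_min_max_path_dp_alt grid
instance (grid : List (List Int)) (out : Int) : Decidable (Spec_find_min_max_path_dp grid out) := by unfold Spec_find_min_max_path_dp; infer_instance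

-- ===== CLAIM (what is proved, stated in full; the proofs are below) =====
def Claim_equal_find_min_max_path_dp : Prop := ∀ (grid : List (List Int)), Dom_find_min_max_path_dp grid → Pre_find_min_max_path_dp grid → Spec_find_min_max_path_dp grid (find_min_max_path_dp grid)

-- ===== LEMMAS AND PROOFS =====

-- the mathematical min-max-path recurrence A computes
def fdp (g : List (List Int)) : Nat → Nat → Int
  | 0, 0 => (g.getD 0 []).getD 0 0
  | 0, j+1 => max (fdp g 0 j) ((g.getD 0 []).getD (j+1) 0)
  | i+1, 0 => max (fdp g i 0) ((g.getD (i+1) []).getD 0 0)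
  | i+1, j+1 => max (min (fdp g i (j+1)) (fdp g (i+1) j)) ((g.getD (i+1) []).getD (j+1) 0)
termination_by i j => (i, j)

theorem fdp_zero_zero (g : List (List Int)) : fdp g 0 0 = (g.getD 0 []).getD 0 0 := by
  rw [fdp.eq_def]

theorem fdp_zero_succ (g : List (List Int)) (j : Nat) :
    fdp g 0 (j+1) = max (fdp g 0 j) ((g.getD 0 []).getD (j+1) 0) := by
  rw [fdp.eq_def]

theorem fdp_succ_zero (g : List (List Int)) (i : Nat) :
    fdp g (i+1) 0 = max (fdp g i 0) ((g.getD (i+1) []).getD 0 0) := by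
  rw [fdp.eq_def]

theorem fdp_succ_succ (g : List (List Int)) (i j : Nat) :
    fdp g (i+1) (j+1) = max (min (fdp g i (j+1)) (fdp g (i+1) j))
      ((g.getD (i+1) []).getD (j+1) 0) := by
  rw [fdp.eq_def]

theorem headI_eq_getD {α : Type} [Inhabited α] (l : List α) (h : l ≠ []) :
    l.headI = l.getD 0 default := by cases l with
  | nil => simp at h
  | cons a t => rfl

-- ---------- A side: the table fill computes fdp (as in the direct proof) ----------

theorem tset_length (t : List (List Int)) (i j : Nat) (v : Int) :
    (tset t i j v).length = t.length := by simp [tset]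

theorem tset_getD_ne (t : List (List Int)) (i j : Nat) (v : Int) (k : Nat) (h : k ≠ i) :
    (tset t i j v).getD k [] = t.getD k [] := by
  simp [tset, List.getD_eq_getElem?_getD, List.getElem?_set_ne (Ne.symm h)]

theorem tset_getD_self (t : List (List Int)) (i j : Nat) (v : Int) (h : i < t.length) :
    (tset t i j v).getD i [] = (t.getD i []).set j v := by
  simp [tset, List.getD_eq_getElem?_getD, h]

theorem inner_fdp (g : List (List Int)) (n : Nat) (t : List (List Int)) (i : Nat)
    (hlen : t.length = g.length) (hi : i < g.length)
    (hprev : 0 < i → ∀ j < n, tget t (i-1) j = fdp g (i-1) j)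
    (hrow : t.getD i [] = List.replicate n 0) :
    ∀ c ≤ n,
      ((List.range c).foldl (bodyA g i) t).length = t.length ∧
      (∀ k, k ≠ i → ((List.range c).foldl (bodyA g i) t).getD k [] = t.getD k []) ∧
      (((List.range c).foldl (bodyA g i) t).getD i []).length = n ∧
      (∀ j < c, tget ((List.range c).foldl (bodyA g i) t) i j = fdp g i j) := by
  intro c
  induction c with
  | zero =>
    intro _
    refine ⟨rfl, fun k _ => rfl, ?_, fun j hj => absurd hj (Nat.not_lt_zero j)⟩
    simp only [List.range_zero, List.foldl_nil]
    rw [hrow]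
    simp
  | succ c ih =>
    intro hc
    obtain ⟨h1, h2, h3, h4⟩ := ih (by omega)
    set tc := (List.range c).foldl (bodyA g i) t with htc
    have hfold : (List.range (c+1)).foldl (bodyA g i) t = bodyA g i tc c := by
      rw [List.range_succ, List.foldl_append, List.foldl_cons, List.foldl_nil]
    have hclen : i < tc.length := by omega
    have hval : ∀ v, v = fdp g i c →
        (tset tc i c v).length = t.length ∧
        (∀ k, k ≠ i → (tset tc i c v).getD k [] = t.getD k []) ∧
        ((tset tc i c v).getD i []).length = n ∧
        (∀ j < c + 1, tget (tset tc i c v) i j = fdp g i j) := by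
      intro v hv
      refine ⟨by rw [tset_length]; exact h1,
        fun k hk => by rw [tset_getD_ne _ _ _ _ _ hk]; exact h2 k hk,
        by rw [tset_getD_self _ _ _ _ hclen]; simpa using h3, ?_⟩
      intro j hj
      unfold tget
      rw [tset_getD_self _ _ _ _ hclen]
      by_cases hjc : j = c
      · subst hjc
        rw [List.getD_eq_getElem?_getD, List.getElem?_set_self (by omega), hv]
        simp
      · rw [List.getD_eq_getElem?_getD, List.getElem?_set_ne (by omega),
          ← List.getD_eq_getElem?_getD]
        exact h4 j (by omega)
    have hside : ∀ k, k ≠ i → ∀ b, tget tc k b = tget t k b := by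
      intro k hk b
      unfold tget
      rw [h2 k hk]
    rw [hfold]
    unfold bodyA
    split_ifs with b1 b2 b3
    · obtain ⟨hi0, hc0⟩ := b1
      refine hval _ ?_
      subst hi0; subst hc0
      rw [fdp_zero_zero]
      rfl
    · obtain ⟨hi0, hcpos⟩ := b2
      refine hval _ ?_
      subst hi0
      obtain ⟨c', rfl⟩ : ∃ c', c = c' + 1 := ⟨c - 1, by omega⟩
      simp only [Nat.add_sub_cancel]
      rw [fdp_zero_succ, h4 c' (by omega)]
      rfl
    · obtain ⟨hipos, hc0⟩ := b3
      refine hval _ ?_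
      subst hc0
      have hpr : tget tc (i-1) 0 = fdp g (i-1) 0 := by
        rw [hside (i-1) (by omega) 0]
        exact hprev hipos 0 (by omega)
      obtain ⟨i', rfl⟩ : ∃ i', i = i' + 1 := ⟨i - 1, by omega⟩
      simp only [Nat.add_sub_cancel] at hpr ⊢
      rw [fdp_succ_zero, hpr]
      rfl
    · have hipos : 0 < i := by
        rcases Nat.eq_zero_or_pos i with h | h
        · exfalso
          rcases Nat.eq_zero_or_pos c with h' | h'
          · exact b1 ⟨h, h'⟩
          · exact b2 ⟨h, h'⟩
        · exact h
      have hcpos : 0 < c := by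
        rcases Nat.eq_zero_or_pos c with h | h
        · exact absurd ⟨hipos, h⟩ b3
        · exact h
      refine hval _ ?_
      have hpr : tget tc (i-1) c = fdp g (i-1) c := by
        rw [hside (i-1) (by omega) c]
        exact hprev hipos c (by omega)
      obtain ⟨i', rfl⟩ : ∃ i', i = i' + 1 := ⟨i - 1, by omega⟩
      obtain ⟨c', rfl⟩ : ∃ c', c = c' + 1 := ⟨c - 1, by omega⟩
      simp only [Nat.add_sub_cancel] at hpr ⊢
      rw [fdp_succ_succ, hpr, h4 c' (by omega)]
      rfl

theorem outer_fdp (g : List (List Int)) (n : Nat) :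
    ∀ r ≤ g.length,
      ((List.range r).foldl (rowA g n) (List.replicate g.length (List.replicate n 0))).length
        = g.length ∧
      (∀ k < r, ∀ j < n,
        tget ((List.range r).foldl (rowA g n) (List.replicate g.length (List.replicate n 0))) k j
          = fdp g k j) ∧
      (∀ k, r ≤ k → k < g.length →
        ((List.range r).foldl (rowA g n) (List.replicate g.length (List.replicate n 0))).getD k []
          = List.replicate n 0) := by
  intro r
  induction r with
  | zero =>
    intro _
    refine ⟨by simp, fun k hk => absurd hk (Nat.not_lt_zero k), fun k _ hk => ?_⟩
    simp only [List.range_zero, List.foldl_nil]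
    rw [List.getD_eq_getElem _ _ (by simpa using hk)]
    simp
  | succ r ih =>
    intro hr
    obtain ⟨h1, h2, h3⟩ := ih (by omega)
    set T := (List.range r).foldl (rowA g n) (List.replicate g.length (List.replicate n 0))
      with hT
    have hfold : (List.range (r+1)).foldl (rowA g n)
        (List.replicate g.length (List.replicate n 0)) = rowA g n T r := by
      rw [List.range_succ, List.foldl_append, List.foldl_cons, List.foldl_nil]
    have hrin : r < g.length := by omega
    obtain ⟨g1, g2, g3, g4⟩ := inner_fdp g n T r h1 hrin
      (fun hrpos j hj => h2 (r-1) (by omega) j hj)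
      (h3 r (by omega) hrin) n (le_refl n)
    rw [hfold]
    unfold rowA
    refine ⟨by rw [g1, h1], ?_, ?_⟩
    · intro k hk j hj
      by_cases hkr : k = r
      · subst hkr; exact g4 j hj
      · unfold tget; rw [g2 k hkr]; exact h2 k (by omega) j hj
    · intro k hk1 hk2
      rw [g2 k (by omega)]
      exact h3 k (by omega) hk2

-- ---------- B side, part 1: the boolean rolling row decides fdp ≤ t ----------

theorem canFirst_length (t : Int) (xs : List Int) : ∀ ok, (canFirst t ok xs).length = xs.length := by
  induction xs with
  | nil => intro ok; rfl
  | cons x xs ih => intro ok; simp [canFirst, ih]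

theorem canNextAux_length (t : Int) (cs : List Bool) : ∀ rs last,
    (canNextAux t last cs rs).length = min cs.length rs.length := by
  induction cs with
  | nil => intro rs last; cases rs <;> rfl
  | cons c cs ih =>
    intro rs last
    cases rs with
    | nil => rfl
    | cons r rs => simp [canNextAux, ih]

theorem canNext_length (t : Int) (can : List Bool) (row : List Int) :
    (canNext t can row).length = min can.length row.length := by
  cases can with
  | nil => cases row <;> rfl
  | cons c cs =>
    cases row with
    | nil => rfl
    | cons r rs => simp [canNext, canNextAux_length]

theorem canFirst_getD_succ (t : Int) (xs : List Int) : ∀ ok j, j + 1 < xs.length →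
    (canFirst t ok xs).getD (j+1) false =
      ((canFirst t ok xs).getD j false && decide (xs.getD (j+1) 0 ≤ t)) := by
  induction xs with
  | nil => intro ok j h; simp at h
  | cons x xs ih =>
    intro ok j h
    cases j with
    | zero =>
      cases xs with
      | nil => simp at h
      | cons y ys => simp [canFirst, Bool.and_assoc]
    | succ k =>
      simp only [canFirst, List.getD_cons_succ]
      exact ih _ k (by simpa using h)

theorem canFirst_getD_zero (t : Int) (r : List Int) (h : r ≠ []) :
    (canFirst t true r).getD 0 false = decide (r.getD 0 0 ≤ t) := by
  cases r with
  | nil => simp at h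
  | cons x xs => simp [canFirst]

theorem canNextAux_getD_succ (t : Int) (cs : List Bool) : ∀ rs last j,
    j + 1 < cs.length → j + 1 < rs.length →
    (canNextAux t last cs rs).getD (j+1) false =
      (((canNextAux t last cs rs).getD j false || cs.getD (j+1) false)
        && decide (rs.getD (j+1) 0 ≤ t)) := by
  induction cs with
  | nil => intro rs last j h _; simp at h
  | cons c cs ih =>
    intro rs last j hc hr
    cases rs with
    | nil => simp at hr
    | cons r rs =>
      cases j with
      | zero =>
        cases cs with
        | nil => simp at hc
        | cons c1 ct =>
          cases rs with
          | nil => simp at hr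
          | cons r1 rt => rfl
      | succ k =>
        simp only [canNextAux, List.getD_cons_succ]
        exact ih rs _ k (by simpa using hc) (by simpa using hr)

theorem canNext_getD_zero (t : Int) (can : List Bool) (row : List Int)
    (hc : can ≠ []) (hr : row ≠ []) :
    (canNext t can row).getD 0 false = (can.getD 0 false && decide (row.getD 0 0 ≤ t)) := by
  cases can with
  | nil => simp at hc
  | cons c cs =>
    cases row with
    | nil => simp at hr
    | cons r rs => rfl

theorem canNext_getD_succ (t : Int) (can : List Bool) (row : List Int) (j : Nat)
    (hc : j + 1 < can.length) (hr : j + 1 < row.length) :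
    (canNext t can row).getD (j+1) false =
      (((canNext t can row).getD j false || can.getD (j+1) false)
        && decide (row.getD (j+1) 0 ≤ t)) := by
  cases can with
  | nil => simp at hc
  | cons c cs =>
    cases row with
    | nil => simp at hr
    | cons r rs =>
      cases j with
      | zero =>
        cases cs with
        | nil => simp at hc
        | cons c1 ct =>
          cases rs with
          | nil => simp at hr
          | cons r1 rt => rfl
      | succ k =>
        simp only [canNext, List.getD_cons_succ]
        exact canNextAux_getD_succ t cs rs _ k (by simpa using hc) (by simpa using hr)

-- the first boolean row decides fdp at i = 0
theorem first_reach (g : List (List Int)) (t : Int) (hne : g ≠ []) :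
    ∀ j < g.headI.length, (canFirst t true g.headI).getD j false = decide (fdp g 0 j ≤ t) := by
  have hh : g.headI = g.getD 0 [] := headI_eq_getD g hne
  intro j
  induction j with
  | zero =>
    intro hj
    have hqr : g.headI ≠ [] := by intro h; rw [h] at hj; simp at hj
    rw [canFirst_getD_zero _ _ hqr, fdp_zero_zero, hh]
  | succ k ih =>
    intro hj
    rw [canFirst_getD_succ _ _ _ k hj, ih (by omega), fdp_zero_succ, hh]
    simp

-- one rolling boolean row step decides one fdp row
theorem step_reach (g : List (List Int)) (t : Int) (n i : Nat) (can : List Bool)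
    (hn : 0 < n) (hcan : can.length = n) (hrlen : n ≤ (g.getD (i+1) []).length)
    (hmatch : ∀ j < n, can.getD j false = decide (fdp g i j ≤ t)) :
    (canNext t can (g.getD (i+1) [])).length = n ∧
    ∀ j < n, (canNext t can (g.getD (i+1) [])).getD j false = decide (fdp g (i+1) j ≤ t) := by
  refine ⟨by rw [canNext_length]; omega, ?_⟩
  intro j
  induction j with
  | zero =>
    intro hj
    rw [canNext_getD_zero _ _ _ (by intro h; subst h; simp at hcan; omega)
      (by intro h; rw [h] at hrlen; simp at hrlen; omega)]
    rw [hmatch 0 hn, fdp_succ_zero]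
    simp
  | succ k ih =>
    intro hj
    rw [canNext_getD_succ _ _ _ k (by omega) (by omega), ih (by omega),
      hmatch (k+1) hj, fdp_succ_succ]
    simp
    rw [Bool.or_comm]

-- B's fold over the remaining rows decides fdp row by row
theorem fold_reach (g : List (List Int)) (t : Int) (n : Nat) (hn : 0 < n)
    (hrows : ∀ row ∈ g, n ≤ row.length) :
    ∀ (rows : List (List Int)) (i : Nat) (x : List Bool),
      rows = g.drop (i+1) → x.length = n → (∀ j < n, x.getD j false = decide (fdp g i j ≤ t)) →
      (rows.foldl (canNext t) x).length = n ∧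
      ∀ j < n, (rows.foldl (canNext t) x).getD j false = decide (fdp g (i + rows.length) j ≤ t) := by
  intro rows
  induction rows with
  | nil => intro i x _ hx hm; exact ⟨hx, by simpa using hm⟩
  | cons r rs ih =>
    intro i x hdrop hx hm
    have hlt : i + 1 < g.length := by
      by_contra h
      rw [List.drop_eq_nil_of_le (by omega)] at hdrop
      simp at hdrop
    have hr : r = g.getD (i+1) [] := by
      have h1 : (g.drop (i+1)).head? = some r := by rw [← hdrop]; rfl
      rw [List.head?_drop] at h1
      rw [List.getD_eq_getElem?_getD, h1]
      rfl
    have hrs : rs = g.drop (i+2) := by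
      have h2 : (g.drop (i+1)).tail = g.drop (i+1+1) := List.tail_drop ..
      rw [← hdrop] at h2
      simpa using h2
    have hmem : g.getD (i+1) [] ∈ g := by
      rw [List.getD_eq_getElem _ _ hlt]; exact List.getElem_mem _
    obtain ⟨hlen', hmatch'⟩ := step_reach g t n i x hn hx (hrows _ hmem) hm
    rw [hr]
    have hrec := ih (i+1) (canNext t x (g.getD (i+1) [])) hrs hlen' hmatch'
    refine ⟨hrec.1, ?_⟩
    intro j hj
    have h2 := hrec.2 j hj
    simp only [List.foldl_cons, List.length_cons]
    have heq : i + (rs.length + 1) = (i + 1) + rs.length := by omega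
    exact heq ▸ h2

-- reachable(t) decides fdp at the corner
theorem reachableB_eq (g : List (List Int)) (t : Int)
    (hne : g ≠ []) (hn : 0 < g.headI.length)
    (hrows : ∀ row ∈ g, g.headI.length ≤ row.length) :
    reachableB g t = decide (fdp g (g.length - 1) (g.headI.length - 1) ≤ t) := by
  unfold reachableB
  set n := g.headI.length with hndef
  have hm : 0 < g.length := List.length_pos_iff.mpr hne
  obtain ⟨b1, b2⟩ := fold_reach g t n hn hrows g.tail 0 (canFirst t true g.headI)
    (by rw [List.drop_one]) (canFirst_length t g.headI true) (first_reach g t hne)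
  have htl : g.tail.length = g.length - 1 := by rw [List.length_tail]
  rw [b2 (n-1) (by omega), htl, Nat.zero_add]

-- ---------- B side, part 2: fdp's value is one of the grid's cells ----------

theorem cell_mem (g : List (List Int)) (n i j : Nat)
    (hrows : ∀ row ∈ g, n ≤ row.length) (hi : i < g.length) (hj : j < n) :
    (g.getD i []).getD j 0 ∈ g.flatMap (fun r => r) := by
  have hrow : g.getD i [] ∈ g := by
    rw [List.getD_eq_getElem _ _ hi]; exact List.getElem_mem _
  have hjlt : j < (g.getD i []).length := lt_of_lt_of_le hj (hrows _ hrow)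
  rw [List.mem_flatMap]
  refine ⟨g.getD i [], hrow, ?_⟩
  rw [List.getD_eq_getElem _ _ hjlt]
  exact List.getElem_mem _

theorem fdp_mem (g : List (List Int)) (n : Nat)
    (hrows : ∀ row ∈ g, n ≤ row.length) :
    ∀ i < g.length, ∀ j < n, fdp g i j ∈ g.flatMap (fun r => r) := by
  intro i
  induction i with
  | zero =>
    intro hi j
    induction j with
    | zero =>
      intro hj
      rw [fdp_zero_zero]
      exact cell_mem g n 0 0 hrows hi hj
    | succ k ih =>
      intro hj
      rw [fdp_zero_succ]
      rcases max_choice (fdp g 0 k) ((g.getD 0 []).getD (k+1) 0) with h | h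
      · rw [h]; exact ih (by omega)
      · rw [h]; exact cell_mem g n 0 (k+1) hrows hi hj
  | succ i ihi =>
    intro hi j
    induction j with
    | zero =>
      intro hj
      rw [fdp_succ_zero]
      rcases max_choice (fdp g i 0) ((g.getD (i+1) []).getD 0 0) with h | h
      · rw [h]; exact ihi (by omega) 0 hj
      · rw [h]; exact cell_mem g n (i+1) 0 hrows hi hj
    | succ k ihj =>
      intro hj
      rw [fdp_succ_succ]
      rcases max_choice (min (fdp g i (k+1)) (fdp g (i+1) k))
          ((g.getD (i+1) []).getD (k+1) 0) with h | h
      · rw [h]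
        rcases min_choice (fdp g i (k+1)) (fdp g (i+1) k) with h' | h'
        · rw [h']; exact ihi (by omega) (k+1) hj
        · rw [h']; exact ihj (by omega)
      · rw [h]; exact cell_mem g n (i+1) (k+1) hrows hi hj

-- ---------- B side, part 3: binary search on a strictly sorted list ----------

theorem getD_mono_of_pairwise_lt (vals : List Int)
    (hs : vals.Pairwise (· < ·)) (k j : Nat) (hkj : k ≤ j) (hj : j < vals.length) :
    vals.getD k 0 ≤ vals.getD j 0 := by
  rcases Nat.lt_or_ge k j with h | h
  · rw [List.getD_eq_getElem _ _ (by omega), List.getD_eq_getElem _ _ hj]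
    exact le_of_lt ((List.pairwise_iff_getElem.mp hs) k j (by omega) hj h)
  · have : k = j := by omega
    subst this
    exact le_refl _

theorem bsLoop_inv (g : List (List Int)) (vals : List Int) (F : Int)
    (hreach : ∀ t, reachableB g t = decide (F ≤ t))
    (hs : vals.Pairwise (· < ·)) :
    ∀ d lo hi, hi - lo = d → lo ≤ hi → hi < vals.length →
      F ≤ vals.getD hi 0 → (∀ k < lo, ¬ F ≤ vals.getD k 0) →
      bsLoop g vals lo hi < vals.length ∧
      F ≤ vals.getD (bsLoop g vals lo hi) 0 ∧
      (∀ k < bsLoop g vals lo hi, ¬ F ≤ vals.getD k 0) := by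
  intro d
  induction d using Nat.strong_induction_on with
  | _ d ih =>
    intro lo hi hd hle hlen hhi hlo
    rw [bsLoop]
    by_cases hlt : lo < hi
    · simp only [hlt, if_true]
      rw [hreach]
      by_cases hp : F ≤ vals.getD ((lo + hi) / 2) 0
      · simp only [hp, decide_true, if_true]
        exact ih ((lo + hi) / 2 - lo) (by omega) lo ((lo + hi) / 2) rfl (by omega)
          (by omega) hp hlo
      · simp only [hp, decide_false]
        refine ih (hi - ((lo + hi) / 2 + 1)) (by omega) ((lo + hi) / 2 + 1) hi rfl
          (by omega) hlen hhi ?_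
        intro k hk hFk
        rcases Nat.lt_or_ge k lo with h | h
        · exact hlo k h hFk
        · exact hp (le_trans hFk
            (getD_mono_of_pairwise_lt vals hs k ((lo + hi) / 2) (by omega) (by omega)))
    · simp only [hlt, if_false]
      have : lo = hi := by omega
      subst this
      exact ⟨hlen, hhi, hlo⟩

-- ===== VERDICT (by name: the statement is the Claim_ definition above) =====
theorem find_min_max_path_dp_spec : Claim_equal_find_min_max_path_dp := by
  intro grid _ hpre
  obtain ⟨hne, hn, hrows⟩ := hpre
  unfold Spec_find_min_max_path_dp
  set n := grid.headI.length with hndef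
  set m := grid.length with hmdef
  have hm : 0 < m := List.length_pos_iff.mpr hne
  obtain ⟨a1, a2, a3⟩ := outer_fdp grid n m (le_refl m)
  have hA : find_min_max_path_dp grid = fdp grid (m-1) (n-1) := by
    unfold find_min_max_path_dp
    exact a2 (m-1) (by omega) (n-1) (by omega)
  set F := fdp grid (m-1) (n-1) with hFdef
  set vals := PySem.List.sorted (PySem.Set.ofList (grid.flatMap (fun r => r))) (fun x => x) false
    with hvals
  have hreach : ∀ t, reachableB grid t = decide (F ≤ t) := fun t =>
    reachableB_eq grid t hne hn hrows
  have hsorted : vals.Pairwise (· < ·) := by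
    rw [hvals]
    exact PySem.List.sorted_ofList_pairwise_lt (grid.flatMap (fun r => r))
  have hFmem : F ∈ vals := by
    rw [hvals, PySem.List.mem_sorted, PySem.Set.mem_ofList]
    exact fdp_mem grid n hrows (m-1) (by omega) (n-1) (by omega)
  obtain ⟨s, hslt, hs⟩ := List.mem_iff_getElem.mp hFmem
  have hvlen : 0 < vals.length := by omega
  have hsD : vals.getD s 0 = F := by rw [List.getD_eq_getElem _ _ hslt]; exact hs
  have hhi : F ≤ vals.getD (vals.length - 1) 0 := by
    rw [← hsD]
    exact getD_mono_of_pairwise_lt vals hsorted s (vals.length - 1) (by omega) (by omega)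
  obtain ⟨r1, r2, r3⟩ := bsLoop_inv grid vals F hreach hsorted
    (vals.length - 1 - 0) 0 (vals.length - 1) rfl (by omega) (by omega) hhi
    (fun k hk => absurd hk (Nat.not_lt_zero k))
  set r := bsLoop grid vals 0 (vals.length - 1) with hrdef
  have hr_le_s : r ≤ s := by
    by_contra h
    exact r3 s (by omega) (le_of_eq hsD.symm)
  have hB : find_min_max_path_dp_alt grid = F := by
    simp only [find_min_max_path_dp_alt]
    rw [← hvals, ← hrdef]
    have h1 : vals.getD r 0 ≤ F := by
      rw [← hsD]
      exact getD_mono_of_pairwise_lt vals hsorted r s hr_le_s hslt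
    omega
  rw [hA, hB, hFdef]
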